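-- pv_equiv track=rewrite | github.com/Haku8866/URCL | ExampleISA.py | LabelISA
-- ===== SOURCE A (Python) =====
-- def LabelISA(code):
--     done = False
--     while not done:
--         done = True
--         for i, ins in enumerate(code):
--             # Here, only "ADD reg reg reg" is supported, so we need to handle "ADD reg IMM reg"
--             # ins.split()[0] is the first word in the line, in this case, it's the opcode.
--             if ins.split()[0] == "MOV":
--                 # if the first character of the second operand is a number, aka, check if the instruction is moving a register to a register or an immediate to a register.
--                 if ins.split()[2][0].isnumeric():
--                     # MOV $1, 15 is not a valid MOV instruction, it should be IMM $1, 15. This fixes it.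
--                     code[i] = code[i].replace("MOV", "IMM")
--             # Now, "ADD reg reg reg" and "ADD reg imm reg" are handled, but we need to handle "ADD reg imm/reg imm" as well.
--             if ins.split()[0] == "ADD":
--                 if ins.split()[2][0].isnumeric():
--                     # If this code triggers, we're dealing with ADD $1, 15.
--                     # So, we need to change it to IMM 15 ; ADD $1, MDR.
--                     code = code[0:i] + [f"IMM {ins.split()[2]}"] + [f"ADD {ins.split()[1]} MDR"] + code[i+1:]
--                     done = False
--                     # As before, if we're changing the length of the list, we need to break and iterate through from the start again.
--                     break
--     # Note that usually the compiler will handle all of this for you, this is only for if you have a special instruction such as "ADI: Add immediate"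
--     return code
-- ===== SOURCE B (Python) =====
-- def LabelISA(code):
--     # Single forward pass: each line maps independently to one or two output lines,
--     # so no restart-from-the-start is ever needed.
--     out = []
--     for ins in code:
--         t = ins.split()
--         if t[0] == "MOV" and t[2][0].isnumeric():
--             out.append(ins.replace("MOV", "IMM"))
--         elif t[0] == "ADD" and t[2][0].isnumeric():
--             out.append(f"IMM {t[2]}")
--             out.append(f"ADD {t[1]} MDR")
--         else:
--             out.append(ins)
--     return out
-- ===== Notes on version B (the rewrite author's own statement) =====
-- stated objective: alternative
-- what changed: Each input line maps independently to one or two output lines, so B rewrites the program in a single forward pass with an output accumulator instead of A's restart-from-index-0 outer while-loop after every ADD-immediate expansion.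
import Mathlib
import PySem

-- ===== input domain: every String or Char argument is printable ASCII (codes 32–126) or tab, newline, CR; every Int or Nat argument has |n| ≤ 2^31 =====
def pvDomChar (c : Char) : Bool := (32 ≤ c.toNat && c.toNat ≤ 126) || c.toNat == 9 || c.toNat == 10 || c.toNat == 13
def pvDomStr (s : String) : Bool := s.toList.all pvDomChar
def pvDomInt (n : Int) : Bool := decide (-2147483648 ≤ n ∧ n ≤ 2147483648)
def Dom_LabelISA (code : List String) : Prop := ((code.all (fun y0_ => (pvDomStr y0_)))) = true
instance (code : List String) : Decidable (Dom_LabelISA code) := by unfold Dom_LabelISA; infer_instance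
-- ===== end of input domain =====

-- B is a single forward pass building the output list, where A restarts its scan from index 0
-- after every ADD-immediate expansion. Equivalence is about the RETURN value:
-- Python A mutates its argument in place for the MOV→IMM fixes, B does not.

-- ===== PORT A =====
-- One pass of A's inner `for i, ins in enumerate(code)` loop, starting at index i over the
-- current (possibly already MOV-fixed) list; `ins` is code[i] and `ins.split()` is recomputed
-- at every use exactly as in the Python. Result:
--   none                = the Python raises (IndexError on ins.split()[0] / [2]; excluded by Pre_)
--   some (Sum.inr code) = the pass ran to the end, `done` stayed True (the loop exits)
--   some (Sum.inl code) = an ADD-immediate was expanded, `done = False`, `break` (restart)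
-- The two sequential `if`s of A test ins.split()[0] against "MOV" and "ADD"; they are mutually
-- exclusive, so they are transcribed as an if/else-if chain. `.isnumeric()` is ported as
-- PySem.Chars.isdigit, exact on the ASCII domain Dom_LabelISA.
def LabelISA_pass (code : List String) (i : Nat) : Option (List String ⊕ List String) :=
  if h : i < code.length then
    match (PySem.Str.split₀ code[i])[0]? with
    | none => none
    | some t0 =>
      if t0 = "MOV" then
        match (PySem.Str.split₀ code[i])[2]? with
        | none => none
        | some t2 =>
          match PySem.Str.pyGet? t2 0 with
          | none => none
          | some c =>
            if PySem.Chars.isdigit c then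
              LabelISA_pass (code.set i (PySem.Str.replace code[i] "MOV" "IMM")) (i + 1)
            else LabelISA_pass code (i + 1)
      else if t0 = "ADD" then
        match (PySem.Str.split₀ code[i])[2]? with
        | none => none
        | some t2 =>
          match PySem.Str.pyGet? t2 0 with
          | none => none
          | some c =>
            if PySem.Chars.isdigit c then
              match (PySem.Str.split₀ code[i])[1]? with
              | none => none
              | some t1 =>
                some (Sum.inl (PySem.List.slice code (some 0) (some (i : Int)) ++
                  ["IMM " ++ t2] ++ ["ADD " ++ t1 ++ " MDR"] ++
                  PySem.List.slice code (some ((i : Int) + 1)) none))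
            else LabelISA_pass code (i + 1)
      else LabelISA_pass code (i + 1)
  else some (Sum.inr code)
termination_by code.length - i
decreasing_by all_goals (try simp [List.length_set]); omega

-- A's outer `while not done` loop. `code.length + 1` rounds of fuel: each restart removes one
-- ADD-immediate line (proved below), so the fuel is never exhausted on inputs where A returns
-- (a pure totality guard). `none` from a pass = the Python raised (outside Pre_).
def LabelISA_loop (fuel : Nat) (code : List String) : List String :=
  match fuel with
  | 0 => code
  | fuel + 1 =>
    match LabelISA_pass code 0 with
    | none => code
    | some (Sum.inr done) => done
    | some (Sum.inl code') => LabelISA_loop fuel code'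

def LabelISA (code : List String) : List String :=
  LabelISA_loop (code.length + 1) code

-- ===== PORT B =====
-- Source B's test `t[2][0].isnumeric()` under the short-circuiting `and` (`.isnumeric()` ported as
-- PySem.Chars.isdigit, exact on the ASCII domain Dom_LabelISA; false exactly on the raising
-- inputs, which Pre_ excludes).
def LabelISA_altDigit (t : List String) : Bool :=
  match t[2]? with
  | none => false
  | some t2 =>
    match PySem.Str.pyGet? t2 0 with
    | none => false
    | some c => PySem.Chars.isdigit c

-- the body of Source B's single `for ins in code` loop: the lines appended for one input line
def LabelISA_altStep (ins : String) : List String :=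
  let t := PySem.Str.split₀ ins
  if (t[0]? == some "MOV") && LabelISA_altDigit t then
    [PySem.Str.replace ins "MOV" "IMM"]
  else if (t[0]? == some "ADD") && LabelISA_altDigit t then
    ["IMM " ++ t.getD 2 "", "ADD " ++ t.getD 1 "" ++ " MDR"]
  else [ins]

def LabelISA_alt (code : List String) : List String :=
  code.foldl (fun out ins => out ++ LabelISA_altStep ins) []

-- ===== PRECONDITION & SPEC =====
-- Pre_ excludes exactly the inputs on which Python A raises: a line with no tokens
-- (IndexError on ins.split()[0]) or a MOV/ADD line with fewer than 3 tokens
-- (IndexError on ins.split()[2]).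
def Pre_LabelISA (code : List String) : Prop :=
  ∀ ins ∈ code, PySem.Str.split₀ ins ≠ [] ∧
    (((PySem.Str.split₀ ins)[0]? = some "MOV" ∨ (PySem.Str.split₀ ins)[0]? = some "ADD") →
      3 ≤ (PySem.Str.split₀ ins).length)
instance (code : List String) : Decidable (Pre_LabelISA code) := by
  unfold Pre_LabelISA; infer_instance

def pvWitness_LabelISA : List String := ["MOV $1 15", "ADD $2 7 $3", "SUB $1 $2 $3"]

def Spec_LabelISA (code : List String) (out : List String) : Prop := out = LabelISA_alt code
instance (code : List String) (out : List String) : Decidable (Spec_LabelISA code out) := by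
  unfold Spec_LabelISA; infer_instance

-- ===== CLAIM (what is proved, stated in full; the proofs are below) =====
def Claim_equal_LabelISA : Prop :=
  ∀ (code : List String), Dom_LabelISA code → Pre_LabelISA code →
    Spec_LabelISA code (LabelISA code)

-- ===== LEMMAS AND PROOFS =====

-- shorthands used only by the proofs
def pvWs (c : Char) : Bool := PySem.Chars.isspace c
def pvTokOf (s : List Char) : List Char :=
  (s.dropWhile pvWs).takeWhile (fun c => !pvWs c)
def pvRestOf (s : List Char) : List Char :=
  (s.dropWhile pvWs).dropWhile (fun c => !pvWs c)
-- "r is empty or starts with a whitespace character"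
def pvWsHead (r : List Char) : Prop := r = [] ∨ ∃ c r', r = c :: r' ∧ pvWs c = true

theorem pv_go_ws_prefix (w : List Char) (r : List Char) (acc : List (List Char))
    (hw : ∀ c ∈ w, pvWs c = true) :
    PySem.Chars.split₀.go (w ++ r) [] acc = PySem.Chars.split₀.go r [] acc := by
  induction w with
  | nil => rfl
  | cons c w ih =>
    have hc : pvWs c = true := hw c (by simp)
    simp only [List.cons_append, PySem.Chars.split₀.go]
    rw [if_pos (by simpa [pvWs] using hc)]
    simp only [List.isEmpty_nil]
    exact ih (fun c hc => hw c (by simp [hc]))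
theorem pv_go_tok_prefix (t : List Char) (r : List Char) (cur : List Char)
    (acc : List (List Char)) (ht : ∀ c ∈ t, pvWs c = false) :
    PySem.Chars.split₀.go (t ++ r) cur acc =
      PySem.Chars.split₀.go r (t.reverse ++ cur) acc := by
  induction t generalizing cur with
  | nil => simp
  | cons c t ih =>
    have hc : pvWs c = false := ht c (by simp)
    simp only [List.cons_append, PySem.Chars.split₀.go]
    rw [if_neg (by simp [pvWs] at hc; simp [hc])]
    rw [ih (c :: cur) (fun c hc => ht c (by simp [hc]))]
    simp
theorem pv_go_acc (l : List Char) (cur : List Char) (acc : List (List Char)) :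
    ∃ out, PySem.Chars.split₀.go l cur acc = acc.reverse ++ out := by
  induction l generalizing cur acc with
  | nil =>
    by_cases h : cur.isEmpty
    · exact ⟨[], by simp [PySem.Chars.split₀.go, h]⟩
    · exact ⟨[cur.reverse], by simp [PySem.Chars.split₀.go, h]⟩
  | cons c l ih =>
    simp only [PySem.Chars.split₀.go]
    by_cases hc : PySem.Chars.isspace c
    · rw [if_pos hc]
      by_cases hcur : cur.isEmpty
      · rw [if_pos hcur]; exact ih [] acc
      · rw [if_neg hcur]
        obtain ⟨out, hout⟩ := ih [] (cur.reverse :: acc)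
        exact ⟨cur.reverse :: out, by simp [hout]⟩
    · rw [if_neg hc]; exact ih (c :: cur) acc

theorem pv_split₀_head_of_decomp (w t r : List Char) (hw : ∀ c ∈ w, pvWs c = true)
    (htne : t ≠ []) (ht : ∀ c ∈ t, pvWs c = false) (hr : pvWsHead r) :
    (PySem.Chars.split₀ (w ++ t ++ r)).head? = some t := by
  unfold PySem.Chars.split₀
  rw [List.append_assoc, pv_go_ws_prefix w _ [] hw, pv_go_tok_prefix t r [] [] ht]
  rcases hr with rfl | ⟨c, r', rfl, hc⟩
  · simp [PySem.Chars.split₀.go, htne]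
  · simp only [PySem.Chars.split₀.go]
    rw [if_pos (by simpa [pvWs] using hc), if_neg (by simpa using htne)]
    obtain ⟨out, hout⟩ := pv_go_acc r' [] [(t.reverse ++ []).reverse]
    rw [hout]; simp
theorem pv_decomp (s : List Char) :
    s = s.takeWhile pvWs ++ pvTokOf s ++ pvRestOf s := by
  unfold pvTokOf pvRestOf
  rw [List.append_assoc, List.takeWhile_append_dropWhile, List.takeWhile_append_dropWhile]
theorem pv_wsHead_restOf (s : List Char) : pvWsHead (pvRestOf s) := by
  unfold pvRestOf pvWsHead
  rcases h : (s.dropWhile pvWs).dropWhile (fun c => !pvWs c) with _ | ⟨c, r⟩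
  · left; rfl
  · right
    refine ⟨c, r, rfl, ?_⟩
    have := List.head?_dropWhile_not (fun c => !pvWs c) (s.dropWhile pvWs)
    rw [h] at this; simpa using this
theorem pv_tokOf_props (s : List Char) :
    (∀ c ∈ s.takeWhile pvWs, pvWs c = true) ∧ (∀ c ∈ pvTokOf s, pvWs c = false) := by
  constructor
  · exact fun c hc => List.mem_takeWhile_imp hc
  · intro c hc; have := List.mem_takeWhile_imp hc; simpa using this
theorem pv_split₀_head (s : List Char) (t : List Char)
    (h : (PySem.Chars.split₀ s).head? = some t) : t = pvTokOf s := by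
  by_cases hne : pvTokOf s = []
  · -- then dropWhile pvWs s = [], so s is all whitespace and split₀ s = []
    exfalso
    have hdw : s.dropWhile pvWs = [] := by
      rcases hd : s.dropWhile pvWs with _ | ⟨c, r⟩
      · rfl
      · have hc := List.head?_dropWhile_not pvWs s
        rw [hd] at hc; simp at hc
        unfold pvTokOf at hne
        rw [hd] at hne
        simp [hc] at hne
    have hs : ∀ c ∈ s, pvWs c = true := by
      have := List.takeWhile_append_dropWhile (p := pvWs) (l := s)
      rw [hdw, List.append_nil] at this
      intro c hc; rw [← this] at hc; exact List.mem_takeWhile_imp hc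
    have : PySem.Chars.split₀ s = [] := by
      unfold PySem.Chars.split₀
      have := pv_go_ws_prefix s [] [] hs
      simpa using this
    rw [this] at h; simp at h
  · have := pv_split₀_head_of_decomp (s.takeWhile pvWs) (pvTokOf s) (pvRestOf s)
      (pv_tokOf_props s).1 hne (pv_tokOf_props s).2 (pv_wsHead_restOf s)
    rw [← pv_decomp s] at this
    rw [this] at h
    exact (Option.some_inj.mp h).symm
theorem pv_split₀_tokens (s : List Char) :
    ∀ a ∈ PySem.Chars.split₀ s, a ≠ [] ∧ ∀ c ∈ a, pvWs c = false := by
  suffices H : ∀ l cur acc, (∀ a ∈ acc, a ≠ [] ∧ ∀ c ∈ a, pvWs c = false) →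
      (∀ c ∈ cur, pvWs c = false) →
      ∀ a ∈ PySem.Chars.split₀.go l cur acc, a ≠ [] ∧ ∀ c ∈ a, pvWs c = false by
    exact fun a ha => H s [] [] (by simp) (by simp) a ha
  intro l
  induction l with
  | nil =>
    intro cur acc hacc hcur a ha
    simp only [PySem.Chars.split₀.go] at ha
    by_cases h : cur.isEmpty
    · rw [if_pos h] at ha; simp at ha; exact hacc a ha
    · rw [if_neg h] at ha
      simp at ha
      rcases ha with ha | ha
      · exact hacc a ha
      · subst ha
        refine ⟨by simpa [List.isEmpty_iff] using h, by simpa using hcur⟩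
  | cons c l ih =>
    intro cur acc hacc hcur a ha
    simp only [PySem.Chars.split₀.go] at ha
    by_cases hc : PySem.Chars.isspace c
    · rw [if_pos hc] at ha
      by_cases hcure : cur.isEmpty
      · rw [if_pos hcure] at ha; exact ih [] acc hacc (by simp) a ha
      · rw [if_neg hcure] at ha
        refine ih [] (cur.reverse :: acc) ?_ (by simp) a ha
        intro b hb
        simp at hb
        rcases hb with hb | hb
        · subst hb; exact ⟨by simpa [List.isEmpty_iff] using hcure, by simpa using hcur⟩
        · exact hacc b hb
    · rw [if_neg hc] at ha
      refine ih (c :: cur) acc hacc ?_ a ha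
      intro b hb
      rcases List.mem_cons.mp hb with rfl | hb
      · simpa [pvWs] using hc
      · exact hcur b hb
theorem pv_rgo_skip (w l : List Char) (acc : List Char) (fuel : Nat)
    (hw : ∀ c ∈ w, pvWs c = true) :
    PySem.Chars.replace.go ['M','O','V'] ['I','M','M'] (w.length + fuel) (w ++ l) acc =
      PySem.Chars.replace.go ['M','O','V'] ['I','M','M'] fuel l (w.reverse ++ acc) := by
  induction w generalizing acc with
  | nil => simp
  | cons c w ih =>
    have hc : pvWs c = true := hw c (by simp)
    have hcM : c ≠ 'M' := by
      intro h; subst h; simp [pvWs, PySem.Chars.isspace] at hc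
    have hlen : (c :: w).length + fuel = (w.length + fuel) + 1 := by simp; omega
    rw [hlen]
    simp only [List.cons_append, PySem.Chars.replace.go]
    rw [if_neg (by simp [List.isPrefixOf]; intro h; exact absurd h.symm hcM)]
    rw [ih (c :: acc) (fun b hb => hw b (by simp [hb]))]
    simp
theorem pv_rgo_acc (fuel : Nat) (l : List Char) (acc : List Char) :
    ∃ out, PySem.Chars.replace.go ['M','O','V'] ['I','M','M'] fuel l acc =
      acc.reverse ++ out := by
  induction fuel generalizing l acc with
  | zero => exact ⟨l, by simp [PySem.Chars.replace.go]⟩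
  | succ fuel ih =>
    rcases l with _ | ⟨c, t⟩
    · exact ⟨[], by simp [PySem.Chars.replace.go]⟩
    · simp only [PySem.Chars.replace.go]
      by_cases h : List.isPrefixOf ['M','O','V'] (c :: t)
      · rw [if_pos h]
        obtain ⟨out, hout⟩ := ih (List.drop (['M','O','V'] : List Char).length (c :: t)) (['I','M','M'].reverse ++ acc)
        exact ⟨'I' :: 'M' :: 'M' :: out, by rw [hout]; simp⟩
      · rw [if_neg h]
        obtain ⟨out, hout⟩ := ih t (c :: acc)
        exact ⟨c :: out, by rw [hout]; simp⟩
theorem pv_replace_decomp (w r : List Char) (hw : ∀ c ∈ w, pvWs c = true)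
    (hr : pvWsHead r) :
    ∃ r2, PySem.Chars.replace (w ++ ['M','O','V'] ++ r) ['M','O','V'] ['I','M','M'] =
      w ++ ['I','M','M'] ++ r2 ∧ pvWsHead r2 := by
  unfold PySem.Chars.replace
  rw [if_neg (by simp)]
  have hlen : (w ++ ['M','O','V'] ++ r).length = w.length + (r.length + 3) := by
    simp
  rw [hlen, List.append_assoc, pv_rgo_skip w _ [] _ hw]
  rw [show (['M','O','V'] : List Char) ++ r = 'M' :: 'O' :: 'V' :: r from rfl]
  rw [show r.length + 3 = (r.length + 2) + 1 from by omega]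
  simp only [PySem.Chars.replace.go]
  rw [if_pos (by simp [List.isPrefixOf])]
  rw [show List.drop (['M','O','V'] : List Char).length ('M' :: 'O' :: 'V' :: r) = r from by simp]
  rcases hr with rfl | ⟨c, r', rfl, hc⟩
  · refine ⟨[], ?_, Or.inl rfl⟩
    simp [PySem.Chars.replace.go]
  · simp only [List.length_cons]
    rw [show r'.length + 1 + 2 = (r'.length + 2) + 1 from by omega]
    simp only [PySem.Chars.replace.go]
    have hcM : c ≠ 'M' := by
      intro h; subst h; simp [pvWs, PySem.Chars.isspace] at hc
    rw [if_neg (by simp [List.isPrefixOf]; intro h; exact absurd h.symm hcM)]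
    obtain ⟨out, hout⟩ := pv_rgo_acc (r'.length + 2) r'
      (c :: (('I' :: 'M' :: 'M' :: []).reverse ++ (w.reverse ++ [])))
    rw [hout]
    refine ⟨c :: out, by simp, Or.inr ⟨c, out, rfl, hc⟩⟩
theorem pv_str_split₀_idx (s : String) (i : Nat) :
    (PySem.Str.split₀ s)[i]? = ((PySem.Chars.split₀ s.toList)[i]?).map String.ofList := by
  simp [PySem.Str.split₀]
theorem pv_fix_head (ins : String)
    (h : (PySem.Str.split₀ ins)[0]? = some "MOV") :
    (PySem.Str.split₀ (PySem.Str.replace ins "MOV" "IMM"))[0]? = some "IMM" := by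
  rw [pv_str_split₀_idx] at h
  rcases hcs : (PySem.Chars.split₀ ins.toList)[0]? with _ | cs
  · rw [hcs] at h; simp at h
  · rw [hcs] at h
    simp only [Option.map_some, Option.some_inj] at h
    have hcs' : cs = ['M','O','V'] := by
      have := congrArg String.toList h
      rw [String.toList_ofList] at this
      simpa using this
    subst hcs'
    have hhead : (PySem.Chars.split₀ ins.toList).head? = some ['M','O','V'] := by
      rw [List.head?_eq_getElem?]; exact hcs
    have htok := pv_split₀_head _ _ hhead
    have hdec := pv_decomp ins.toList
    rw [← htok] at hdec
    obtain ⟨r2, hrep, hr2⟩ := pv_replace_decomp (ins.toList.takeWhile pvWs) (pvRestOf ins.toList)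
      (pv_tokOf_props ins.toList).1 (pv_wsHead_restOf ins.toList)
    rw [← hdec] at hrep
    have hrepl : (PySem.Str.replace ins "MOV" "IMM").toList =
        ins.toList.takeWhile pvWs ++ ['I','M','M'] ++ r2 := by
      simp only [PySem.Str.replace, String.toList_ofList]
      rw [show "MOV".toList = (['M','O','V'] : List Char) from rfl,
          show "IMM".toList = (['I','M','M'] : List Char) from rfl]
      exact hrep
    rw [pv_str_split₀_idx, hrepl, ← List.head?_eq_getElem?]
    rw [pv_split₀_head_of_decomp (ins.toList.takeWhile pvWs) ['I','M','M'] r2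
      (pv_tokOf_props ins.toList).1 (by simp) (by intro c hc; fin_cases hc <;> rfl) hr2]
    rfl
theorem pv_chars_two_tok (t u : List Char) (htne : t ≠ [])
    (ht : ∀ c ∈ t, pvWs c = false) (hu : u ≠ []) (hnw : ∀ c ∈ u, pvWs c = false) :
    PySem.Chars.split₀ (t ++ ' ' :: u) = [t, u] := by
  unfold PySem.Chars.split₀
  rw [pv_go_tok_prefix t _ [] [] ht]
  simp only [PySem.Chars.split₀.go]
  rw [if_pos (by rfl), if_neg (by simpa using htne)]
  rw [show u = u ++ ([] : List Char) from by simp]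
  rw [pv_go_tok_prefix u [] _ _ hnw]
  simp only [PySem.Chars.split₀.go]
  rw [if_neg (by simpa using hu)]
  simp
theorem pv_chars_three_tok (t u v : List Char) (htne : t ≠ [])
    (ht : ∀ c ∈ t, pvWs c = false) (hu : u ≠ []) (hnw : ∀ c ∈ u, pvWs c = false)
    (hv : v ≠ []) (hnv : ∀ c ∈ v, pvWs c = false) :
    PySem.Chars.split₀ (t ++ ' ' :: u ++ ' ' :: v) = [t, u, v] := by
  unfold PySem.Chars.split₀
  rw [List.append_assoc, pv_go_tok_prefix t _ [] [] ht]
  simp only [List.cons_append, PySem.Chars.split₀.go]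
  rw [if_pos (by rfl), if_neg (by simpa using htne)]
  rw [pv_go_tok_prefix u _ [] _ hnw]
  simp only [PySem.Chars.split₀.go]
  rw [if_pos (by rfl), if_neg (by simpa using hu)]
  rw [show v = v ++ ([] : List Char) from by simp]
  rw [pv_go_tok_prefix v [] _ _ hnv]
  simp only [PySem.Chars.split₀.go]
  rw [if_neg (by simpa using hv)]
  simp
-- membership facts transported to String level
theorem pv_mem_split₀ (s t2 : String) (h : t2 ∈ PySem.Str.split₀ s) :
    t2.toList ≠ [] ∧ ∀ c ∈ t2.toList, pvWs c = false := by
  simp only [PySem.Str.split₀, List.mem_map] at h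
  obtain ⟨cs, hcs, rfl⟩ := h
  rw [String.toList_ofList]
  exact pv_split₀_tokens _ cs hcs
theorem pv_split₀_imm_line (s t2 : String) (h : t2 ∈ PySem.Str.split₀ s) :
    PySem.Str.split₀ ("IMM " ++ t2) = ["IMM", t2] := by
  obtain ⟨hne, hnw⟩ := pv_mem_split₀ s t2 h
  have htl : ("IMM " ++ t2).toList = ['I','M','M'] ++ ' ' :: t2.toList := by
    simp
  simp only [PySem.Str.split₀, htl]
  rw [pv_chars_two_tok ['I','M','M'] t2.toList (by simp)
    (by intro c hc; fin_cases hc <;> rfl) hne hnw]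
  simp [String.ofList_toList]
theorem pv_split₀_addmdr_line (s t1 : String) (h : t1 ∈ PySem.Str.split₀ s) :
    PySem.Str.split₀ ("ADD " ++ t1 ++ " MDR") = ["ADD", t1, "MDR"] := by
  obtain ⟨hne, hnw⟩ := pv_mem_split₀ s t1 h
  have htl : ("ADD " ++ t1 ++ " MDR").toList =
      ['A','D','D'] ++ ' ' :: t1.toList ++ ' ' :: ['M','D','R'] := by
    simp
  simp only [PySem.Str.split₀, htl]
  rw [pv_chars_three_tok ['A','D','D'] t1.toList ['M','D','R'] (by simp)
    (by intro c hc; fin_cases hc <;> rfl) hne hnw (by simp)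
    (by intro c hc; fin_cases hc <;> rfl)]
  simp [String.ofList_toList]
-- per-line classification (pvSafe ins is the per-line condition of Pre_LabelISA)
def pvSafe (ins : String) : Prop :=
  PySem.Str.split₀ ins ≠ [] ∧
    (((PySem.Str.split₀ ins)[0]? = some "MOV" ∨ (PySem.Str.split₀ ins)[0]? = some "ADD") →
      3 ≤ (PySem.Str.split₀ ins).length)
def pvMovImm (ins : String) : Bool :=
  ((PySem.Str.split₀ ins)[0]? == some "MOV") && LabelISA_altDigit (PySem.Str.split₀ ins)
def pvAddImm (ins : String) : Bool :=
  ((PySem.Str.split₀ ins)[0]? == some "ADD") && LabelISA_altDigit (PySem.Str.split₀ ins)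
def pvTrig (ins : String) : Bool := pvMovImm ins || pvAddImm ins
def pvCount (code : List String) : Nat := code.countP pvAddImm
theorem pv_step_plain (ins : String) (h : pvTrig ins = false) :
    LabelISA_altStep ins = [ins] := by
  simp only [pvTrig, Bool.or_eq_false_iff, pvMovImm, pvAddImm] at h
  simp only [LabelISA_altStep]
  rw [if_neg (by simp [h.1]), if_neg (by simp [h.2])]
theorem pv_step_mov (ins : String) (h : pvMovImm ins = true) :
    LabelISA_altStep ins = [PySem.Str.replace ins "MOV" "IMM"] := by
  simp only [pvMovImm] at h
  simp only [LabelISA_altStep]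
  rw [if_pos h]
theorem pv_step_add (ins : String) (h : pvAddImm ins = true) :
    LabelISA_altStep ins = ["IMM " ++ (PySem.Str.split₀ ins).getD 2 "",
      "ADD " ++ (PySem.Str.split₀ ins).getD 1 "" ++ " MDR"] := by
  simp only [pvAddImm] at h
  have hmov : ((PySem.Str.split₀ ins)[0]? == some "MOV") = false := by
    rcases Bool.and_eq_true_iff.mp h with ⟨h0, _⟩
    simp at h0 ⊢
    rw [h0]; intro hc; exact absurd (Option.some_inj.mp hc.symm) (by decide)
  simp only [LabelISA_altStep]
  rw [if_neg (by simp [hmov]), if_pos h]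
theorem pv_fix_inert (ins : String) (h : pvMovImm ins = true) :
    pvSafe (PySem.Str.replace ins "MOV" "IMM") ∧
      pvTrig (PySem.Str.replace ins "MOV" "IMM") = false := by
  rcases Bool.and_eq_true_iff.mp h with ⟨h0, _⟩
  have h0' : (PySem.Str.split₀ ins)[0]? = some "MOV" := by simpa using h0
  have hfix := pv_fix_head ins h0'
  refine ⟨⟨?_, ?_⟩, ?_⟩
  · intro hnil; rw [hnil] at hfix; simp at hfix
  · intro hor
    rcases hor with h1 | h1 <;> rw [hfix] at h1 <;>
      exact absurd (Option.some_inj.mp h1) (by decide)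
  · simp only [pvTrig, pvMovImm, pvAddImm, hfix, Bool.or_eq_false_iff]
    constructor <;> simp
theorem pv_flatMap_of_plain (code : List String) (h : ∀ ins ∈ code, pvTrig ins = false) :
    code.flatMap LabelISA_altStep = code := by
  induction code with
  | nil => rfl
  | cons a l ih =>
    rw [List.flatMap_cons, pv_step_plain a (h a (by simp)), ih (fun i hi => h i (by simp [hi]))]
    rfl
theorem pv_pyGet0_some (t2 : String) (h : t2.toList ≠ []) :
    ∃ c, PySem.Str.pyGet? t2 0 = some c := by
  have hl : 0 < t2.length := by
    rw [← String.length_toList]; exact List.length_pos_of_ne_nil h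
  simp [PySem.List.pyGet?, PySem.List.pyIdx?, hl]

-- the list identities used when a line is modified or expanded
theorem pv_flatMap_set (code : List String) (i : Nat) (h : i < code.length) (v : String)
    (hv : LabelISA_altStep v = LabelISA_altStep code[i]) :
    (code.set i v).flatMap LabelISA_altStep = code.flatMap LabelISA_altStep := by
  rw [List.set_eq_take_append_cons_drop, if_pos h]
  conv_rhs => rw [show code = code.take i ++ code[i] :: code.drop (i+1) from by
    rw [← List.drop_eq_getElem_cons h, List.take_append_drop]]
  simp only [List.flatMap_append, List.flatMap_cons, hv]

theorem pv_countP_set (code : List String) (i : Nat) (h : i < code.length) (v : String)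
    (hv : pvAddImm v = pvAddImm code[i]) :
    pvCount (code.set i v) = pvCount code := by
  unfold pvCount
  rw [List.set_eq_take_append_cons_drop, if_pos h]
  conv_rhs => rw [show code = code.take i ++ code[i] :: code.drop (i+1) from by
    rw [← List.drop_eq_getElem_cons h, List.take_append_drop]]
  simp only [List.countP_append, List.countP_cons, hv]

theorem pv_pass_spec (code : List String) (i : Nat)
    (hsafe : ∀ ins ∈ code, pvSafe ins)
    (hpre : ∀ j, j < i → (hj' : j < code.length) → pvTrig code[j] = false) :
    LabelISA_pass code i = some (Sum.inr (code.flatMap LabelISA_altStep)) ∨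
      ∃ code', LabelISA_pass code i = some (Sum.inl code') ∧
        (∀ ins ∈ code', pvSafe ins) ∧ pvCount code' < pvCount code ∧
        code'.flatMap LabelISA_altStep = code.flatMap LabelISA_altStep := by
  revert hsafe hpre
  induction code, i using LabelISA_pass.induct with
  | case1 code i h ht0 =>
    -- ins.split()[0] raises: impossible under pvSafe
    intro hsafe hpre
    have := (hsafe code[i] (List.getElem_mem h)).1
    rw [List.getElem?_eq_none_iff] at ht0
    exact absurd (List.eq_nil_of_length_eq_zero (by omega)) this
  | case2 code i h ht2 ht0 =>
    intro hsafe hpre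
    have := (hsafe code[i] (List.getElem_mem h)).2 (Or.inl ht0)
    rw [List.getElem?_eq_none_iff] at ht2
    omega
  | case3 code i h t2 ht2 hg ht0 =>
    intro hsafe hpre
    have hmem : t2 ∈ PySem.Str.split₀ code[i] := List.mem_of_getElem? ht2
    obtain ⟨c, hcc⟩ := pv_pyGet0_some t2 (pv_mem_split₀ _ _ hmem).1
    rw [hcc] at hg; exact absurd hg (by simp)
  | case4 code i h t2 ht2 c hc hdig ht0 ih =>
    intro hsafe hpre
    -- MOV-immediate: fix the line in place and continue
    have hmm : pvMovImm code[i] = true := by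
      simp only [pvMovImm, LabelISA_altDigit, ht2, hc, ht0]
      simp [hdig]
    have hinert := pv_fix_inert code[i] hmm
    have hsafe' : ∀ ins ∈ code.set i (PySem.Str.replace code[i] "MOV" "IMM"), pvSafe ins := by
      intro ins hins
      rcases List.mem_or_eq_of_mem_set hins with hins | rfl
      · exact hsafe ins hins
      · exact hinert.1
    have hpre' : ∀ j, j < i + 1 →
        (hj' : j < (code.set i (PySem.Str.replace code[i] "MOV" "IMM")).length) →
        pvTrig (code.set i (PySem.Str.replace code[i] "MOV" "IMM"))[j] = false := by
      intro j hj hj'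
      by_cases hji : j = i
      · subst hji
        rw [List.getElem_set_self (by simpa using hj')]
        exact hinert.2
      · rw [List.getElem_set_ne (by omega)]
        exact hpre j (by omega) (by simpa using hj')
    have hstep : LabelISA_altStep (PySem.Str.replace code[i] "MOV" "IMM") =
        LabelISA_altStep code[i] := by
      rw [pv_step_mov _ hmm, pv_step_plain _ hinert.2]
    have haddeq : pvAddImm (PySem.Str.replace code[i] "MOV" "IMM") = pvAddImm code[i] := by
      have h1 : pvAddImm (PySem.Str.replace code[i] "MOV" "IMM") = false := by
        have := hinert.2; simp only [pvTrig, Bool.or_eq_false_iff] at this; exact this.2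
      have h2 : pvAddImm code[i] = false := by
        simp only [pvAddImm, ht0]
        simp
      rw [h1, h2]
    have hfm := pv_flatMap_set code i h _ hstep
    have hcnt := pv_countP_set code i h _ haddeq
    have hred : LabelISA_pass code i =
        LabelISA_pass (code.set i (PySem.Str.replace code[i] "MOV" "IMM")) (i + 1) := by
      rw [LabelISA_pass]
      simp only [dif_pos h, ht0, ht2, hc, hdig, reduceIte]
    rcases ih hsafe' hpre' with hcase | ⟨code2, hpass, hs2, hc2, hf2⟩
    · left; rw [hred, hcase, hfm]
    · right
      exact ⟨code2, by rw [hred, hpass], hs2, by omega, by rw [hf2, hfm]⟩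
  | case5 code i h t2 ht2 c hc hdig ht0 ih =>
    intro hsafe hpre
    have htrig : pvTrig code[i] = false := by
      simp only [pvTrig, pvMovImm, pvAddImm, LabelISA_altDigit, ht2, hc, ht0]
      simp at hdig
      simp [hdig]
    have hpre' : ∀ j, j < i + 1 → (hj' : j < code.length) → pvTrig code[j] = false := by
      intro j hj hj'
      by_cases hji : j = i
      · subst hji; exact htrig
      · exact hpre j (by omega) hj'
    have hred : LabelISA_pass code i = LabelISA_pass code (i + 1) := by
      have hd' : PySem.Chars.isdigit c = false := by simpa using hdig
      rw [LabelISA_pass]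
      simp only [dif_pos h, ht0, ht2, hc, hd', reduceIte]
      simp
    rw [hred]
    exact ih hsafe hpre'
  | case6 code i h ht2 ht0 hne =>
    intro hsafe hpre
    have := (hsafe code[i] (List.getElem_mem h)).2 (Or.inr ht0)
    rw [List.getElem?_eq_none_iff] at ht2
    omega
  | case7 code i h t2 ht2 hg ht0 hne =>
    intro hsafe hpre
    have hmem : t2 ∈ PySem.Str.split₀ code[i] := List.mem_of_getElem? ht2
    obtain ⟨c, hcc⟩ := pv_pyGet0_some t2 (pv_mem_split₀ _ _ hmem).1
    rw [hcc] at hg; exact absurd hg (by simp)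
  | case8 code i h t2 ht2 c hc hdig ht1 ht0 hne =>
    intro hsafe hpre
    have := (hsafe code[i] (List.getElem_mem h)).2 (Or.inr ht0)
    rw [List.getElem?_eq_none_iff] at ht1
    omega
  | case9 code i h t2 ht2 c hc hdig t1 ht1 ht0 hne =>
    intro hsafe hpre
    -- ADD-immediate: the expansion; prove the second disjunct
    right
    have hadd : pvAddImm code[i] = true := by
      simp only [pvAddImm, LabelISA_altDigit, ht2, hc, ht0]
      simp [hdig]
    have hmem2 : t2 ∈ PySem.Str.split₀ code[i] := List.mem_of_getElem? ht2
    have hmem1 : t1 ∈ PySem.Str.split₀ code[i] := List.mem_of_getElem? ht1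
    have himm := pv_split₀_imm_line _ t2 hmem2
    have hmdr := pv_split₀_addmdr_line _ t1 hmem1
    have himmsafe : pvSafe ("IMM " ++ t2) := by
      constructor
      · rw [himm]; simp
      · rw [himm]; intro hor; rcases hor with h1 | h1 <;> simp at h1
    have hmdrsafe : pvSafe ("ADD " ++ t1 ++ " MDR") := by
      constructor
      · rw [hmdr]; simp
      · rw [hmdr]; intro _; simp
    have himmtrig : pvTrig ("IMM " ++ t2) = false := by
      simp only [pvTrig, pvMovImm, pvAddImm, himm, Bool.or_eq_false_iff]
      constructor <;> simp
    have hmdrtrig : pvTrig ("ADD " ++ t1 ++ " MDR") = false := by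
      simp only [pvTrig, pvMovImm, pvAddImm, LabelISA_altDigit, hmdr, Bool.or_eq_false_iff]
      constructor <;> simp [PySem.List.pyGet?, PySem.List.pyIdx?, PySem.Chars.isdigit]
    have hslice1 : PySem.List.slice code (some 0) (some (i : Int)) = code.take i := by
      have := PySem.List.slice_natCast code 0 i
      simpa using this
    have hslice2 : PySem.List.slice code (some ((i : Int) + 1)) none = code.drop (i + 1) := by
      have := PySem.List.slice_from code (a := (i : Int) + 1) (by omega)
      rw [this, show ((i : Int) + 1).toNat = i + 1 from by omega]
    have hdecomp : code = code.take i ++ code[i] :: code.drop (i+1) := by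
      rw [← List.drop_eq_getElem_cons h, List.take_append_drop]
    have hstepi : LabelISA_altStep code[i] = ["IMM " ++ t2, "ADD " ++ t1 ++ " MDR"] := by
      rw [pv_step_add _ hadd]
      have e2 : (PySem.Str.split₀ code[i]).getD 2 "" = t2 := by
        rw [List.getD_eq_getElem?_getD, ht2]; rfl
      have e1 : (PySem.Str.split₀ code[i]).getD 1 "" = t1 := by
        rw [List.getD_eq_getElem?_getD, ht1]; rfl
      rw [e1, e2]
    refine ⟨code.take i ++ ["IMM " ++ t2] ++ ["ADD " ++ t1 ++ " MDR"] ++ code.drop (i+1),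
      ?_, ?_, ?_, ?_⟩
    · rw [LabelISA_pass]
      simp only [dif_pos h, ht0, ht2, hc, ht1, hdig, reduceIte]
      rw [if_neg hne, hslice1, hslice2]
    · intro ins hins
      simp only [List.append_assoc, List.mem_append, List.mem_cons] at hins
      rcases hins with hins | hins | hins | hins
      · exact hsafe ins (List.mem_of_mem_take hins)
      · simp at hins; subst hins; exact himmsafe
      · simp at hins; subst hins; exact hmdrsafe
      · exact hsafe ins (List.mem_of_mem_drop hins)
    · unfold pvCount
      conv_rhs => rw [hdecomp]
      simp only [List.countP_append, List.countP_cons, List.countP_nil]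
      have himmadd : pvAddImm ("IMM " ++ t2) = false := by
        have := himmtrig; simp only [pvTrig, Bool.or_eq_false_iff] at this; exact this.2
      have hmdradd : pvAddImm ("ADD " ++ t1 ++ " MDR") = false := by
        have := hmdrtrig; simp only [pvTrig, Bool.or_eq_false_iff] at this; exact this.2
      simp [himmadd, hmdradd, hadd]
    · conv_rhs => rw [hdecomp]
      simp only [List.flatMap_append, List.flatMap_cons, List.flatMap_nil]
      rw [pv_step_plain _ himmtrig, pv_step_plain _ hmdrtrig, hstepi]
      simp
  | case10 code i h t2 ht2 c hc hdig ht0 hne ih =>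
    intro hsafe hpre
    have htrig : pvTrig code[i] = false := by
      simp only [pvTrig, pvMovImm, pvAddImm, LabelISA_altDigit, ht2, hc, ht0]
      simp at hdig
      simp [hdig]
    have hpre' : ∀ j, j < i + 1 → (hj' : j < code.length) → pvTrig code[j] = false := by
      intro j hj hj'
      by_cases hji : j = i
      · subst hji; exact htrig
      · exact hpre j (by omega) hj'
    have hred : LabelISA_pass code i = LabelISA_pass code (i + 1) := by
      have hd' : PySem.Chars.isdigit c = false := by simpa using hdig
      rw [LabelISA_pass]
      simp only [dif_pos h, ht0, ht2, hc, hd', reduceIte]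
      simp
    rw [hred]
    exact ih hsafe hpre'
  | case11 code i h t0 ht0 hnm hna ih =>
    intro hsafe hpre
    have htrig : pvTrig code[i] = false := by
      simp only [pvTrig, pvMovImm, pvAddImm, ht0, Bool.or_eq_false_iff]
      constructor <;> simp [hnm, hna]
    have hpre' : ∀ j, j < i + 1 → (hj' : j < code.length) → pvTrig code[j] = false := by
      intro j hj hj'
      by_cases hji : j = i
      · subst hji; exact htrig
      · exact hpre j (by omega) hj'
    have hred : LabelISA_pass code i = LabelISA_pass code (i + 1) := by
      rw [LabelISA_pass]
      simp only [dif_pos h, ht0]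
      rw [if_neg hnm, if_neg hna]
    rw [hred]
    exact ih hsafe hpre'
  | case12 code i h =>
    intro hsafe hpre
    left
    have hall : ∀ ins ∈ code, pvTrig ins = false := by
      intro ins hins
      obtain ⟨j, hj, rfl⟩ := List.mem_iff_getElem.mp hins
      exact hpre j (by omega) hj
    rw [LabelISA_pass, pv_flatMap_of_plain code hall, dif_neg h]

theorem pv_loop_spec (fuel : Nat) (code : List String)
    (hsafe : ∀ ins ∈ code, pvSafe ins) (hfuel : pvCount code < fuel) :
    LabelISA_loop fuel code = code.flatMap LabelISA_altStep := by
  induction fuel generalizing code with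
  | zero => omega
  | succ fuel ih =>
    rcases pv_pass_spec code 0 hsafe (fun j hj _ => absurd hj (by omega)) with
      hp | ⟨code', hp, hs', hc', hf'⟩
    · simp only [LabelISA_loop, hp]
    · simp only [LabelISA_loop, hp]
      rw [ih code' hs' (by omega), hf']

theorem pv_alt_eq_flatMap (code : List String) :
    LabelISA_alt code = code.flatMap LabelISA_altStep := by
  unfold LabelISA_alt
  rw [PySem.List.foldl_append_eq_flatMap]
  simp

-- ===== VERDICT (by name: the statement is the Claim_ definition above) =====
theorem LabelISA_spec : Claim_equal_LabelISA := by
  intro code _ hpre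
  unfold Spec_LabelISA LabelISA
  rw [pv_alt_eq_flatMap]
  exact pv_loop_spec _ code (fun ins h => hpre ins h)
    (Nat.lt_succ_of_le List.countP_le_length)
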